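-- pv_equiv track=rewrite | github.com/Jehyung-dev/Algorithm | SWEA/D4/6109. 추억의 2048게임/추억의 2048게임.py | set_arr
-- ===== SOURCE A (Python) =====
-- def set_arr(temp_arr, N, dr):
--     if dr == 'up':
--         arr = [[0]*N for _ in range(N)]
--         for r in range(N):
--             idx = 0
--             for c in range(N):
--                 if temp_arr[c][r] != 0:
--                     arr[idx][r] = temp_arr[c][r]
--                     idx += 1
--         return arr
--     if dr == 'down':
--         arr = [[0]*N for _ in range(N)]
--         for r in range(N):
--             idx = N-1
--             for c in range(N-1, -1, -1):
--                 if temp_arr[c][r] != 0: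
--                     arr[idx][r] = temp_arr[c][r]
--                     idx -= 1
--         return arr
--     if dr == 'left':
--         arr = [[0]*N for _ in range(N)]
--         for r in range(N):
--             idx = 0
--             for c in range(N):
--                 if temp_arr[r][c] != 0:
--                     arr[r][idx] = temp_arr[r][c]
--                     idx += 1
--         return arr
--     if dr == 'right':
--         arr = [[0]*N for _ in range(N)]
--         for r in range(N):
--             idx = N-1
--             for c in range(N-1, -1, -1):
--                 if temp_arr[r][c] != 0:
--                     arr[r][idx] = temp_arr[r][c]
--                     idx -= 1
--         return arr
-- ===== SOURCE B (Python) =====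
-- def set_arr(temp_arr, N, dr):
--     if dr not in ('up', 'down', 'left', 'right'):
--         return None
--
--     def slide(line):
--         nz = [v for v in line if v != 0]
--         pad = [0] * (N - len(nz))
--         return pad + nz if dr in ('down', 'right') else nz + pad
--
--     if dr in ('left', 'right'):
--         return [slide([temp_arr[r][c] for c in range(N)]) for r in range(N)]
--     cols = [slide([temp_arr[c][r] for c in range(N)]) for r in range(N)]
--     return [[cols[c][r] for c in range(N)] for r in range(N)]
-- ===== Notes on version B (the rewrite author's own statement) =====
-- stated objective: idiomatic
-- what changed: Replaces four near-identical in-place index-writing loops with one filter-then-pad line-slider applied to rows (left/right) or to columns followed by a transpose (up/down).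
import Mathlib
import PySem

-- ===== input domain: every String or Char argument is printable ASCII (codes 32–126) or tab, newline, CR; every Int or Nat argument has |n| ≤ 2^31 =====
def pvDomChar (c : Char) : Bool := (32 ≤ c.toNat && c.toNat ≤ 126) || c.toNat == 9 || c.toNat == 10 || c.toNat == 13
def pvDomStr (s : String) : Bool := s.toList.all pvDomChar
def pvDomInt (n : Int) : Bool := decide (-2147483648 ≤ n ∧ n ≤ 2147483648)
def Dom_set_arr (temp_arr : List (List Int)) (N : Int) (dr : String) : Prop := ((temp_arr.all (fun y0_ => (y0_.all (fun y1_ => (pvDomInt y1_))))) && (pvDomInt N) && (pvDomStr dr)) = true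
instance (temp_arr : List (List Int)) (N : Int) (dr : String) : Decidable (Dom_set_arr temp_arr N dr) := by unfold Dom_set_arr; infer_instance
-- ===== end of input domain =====

-- B replaces A's four in-place index-writing loops with one filter-then-pad line slider
-- applied per row (left/right) or per column plus a transpose (up/down); same results, same cost.


-- ===== PORT A =====
-- temp_arr[c][r]  (in range on every executed read under Pre_; the getD defaults are unreachable there)
def pvCell (t : List (List Int)) (c r : Int) : Int :=
  PySem.List.pyGetD (PySem.List.pyGetD t c []) r 0

-- [[0]*N for _ in range(N)]
def pvZero (N : Int) : List (List Int) :=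
  (PySem.List.pyRange 0 N 1).map (fun _ => List.replicate N.toNat (0 : Int))

-- arr[i][j] = v  (i, j in range on every executed write, so List.modify/List.set are exact)
def pvWrite (g : List (List Int)) (i j : Int) (v : Int) : List (List Int) :=
  g.modify i.toNat (fun row => row.set j.toNat v)

def set_arr (temp_arr : List (List Int)) (N : Int) (dr : String) : Option (List (List Int)) :=
  if dr = "up" then
    some ((PySem.List.pyRange 0 N 1).foldl (fun arr r =>
      ((PySem.List.pyRange 0 N 1).foldl (fun (st : List (List Int) × Int) c =>
        if pvCell temp_arr c r ≠ 0 then (pvWrite st.1 st.2 r (pvCell temp_arr c r), st.2 + 1)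
        else st) (arr, (0 : Int))).1) (pvZero N))
  else if dr = "down" then
    some ((PySem.List.pyRange 0 N 1).foldl (fun arr r =>
      ((PySem.List.pyRange (N-1) (-1) (-1)).foldl (fun (st : List (List Int) × Int) c =>
        if pvCell temp_arr c r ≠ 0 then (pvWrite st.1 st.2 r (pvCell temp_arr c r), st.2 - 1)
        else st) (arr, N - 1)).1) (pvZero N))
  else if dr = "left" then
    some ((PySem.List.pyRange 0 N 1).foldl (fun arr r =>
      ((PySem.List.pyRange 0 N 1).foldl (fun (st : List (List Int) × Int) c =>
        if pvCell temp_arr r c ≠ 0 then (pvWrite st.1 r st.2 (pvCell temp_arr r c), st.2 + 1)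
        else st) (arr, (0 : Int))).1) (pvZero N))
  else if dr = "right" then
    some ((PySem.List.pyRange 0 N 1).foldl (fun arr r =>
      ((PySem.List.pyRange (N-1) (-1) (-1)).foldl (fun (st : List (List Int) × Int) c =>
        if pvCell temp_arr r c ≠ 0 then (pvWrite st.1 r st.2 (pvCell temp_arr r c), st.2 - 1)
        else st) (arr, N - 1)).1) (pvZero N))
  else none

-- ===== PORT B =====
-- one line slider: nonzeros kept, zeros padded at the far side
def pvSlide (N : Int) (dr : String) (line : List Int) : List Int :=
  let nz := line.filter (fun v => decide (v ≠ 0))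
  let pad := List.replicate (N - (nz.length : Int)).toNat (0 : Int)
  if dr = "down" ∨ dr = "right" then pad ++ nz else nz ++ pad

def set_arr_alt (temp_arr : List (List Int)) (N : Int) (dr : String) : Option (List (List Int)) :=
  if ¬ (dr = "up" ∨ dr = "down" ∨ dr = "left" ∨ dr = "right") then none
  else if dr = "left" ∨ dr = "right" then
    some ((PySem.List.pyRange 0 N 1).map (fun r =>
      pvSlide N dr ((PySem.List.pyRange 0 N 1).map (fun c => pvCell temp_arr r c))))
  else
    let cols := (PySem.List.pyRange 0 N 1).map (fun r =>
      pvSlide N dr ((PySem.List.pyRange 0 N 1).map (fun c => pvCell temp_arr c r)))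
    some ((PySem.List.pyRange 0 N 1).map (fun r =>
      (PySem.List.pyRange 0 N 1).map (fun c =>
        PySem.List.pyGetD (PySem.List.pyGetD cols c []) r 0)))

-- ===== PRECONDITION & SPEC =====
-- A raises IndexError exactly when dr is a direction and some accessed cell of the leading
-- N×N block is missing; Pre_ admits everything else (any dr, any grid whose first N rows
-- have length ≥ N, and any N ≤ 0, where no access happens).
def Pre_set_arr (temp_arr : List (List Int)) (N : Int) (dr : String) : Prop :=
  (dr = "up" ∨ dr = "down" ∨ dr = "left" ∨ dr = "right") →
    (N ≤ (temp_arr.length : Int) ∧ ∀ row ∈ temp_arr.take N.toNat, N ≤ (row.length : Int))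
instance (temp_arr : List (List Int)) (N : Int) (dr : String) : Decidable (Pre_set_arr temp_arr N dr) := by unfold Pre_set_arr; infer_instance

def pvWitness_set_arr : List (List Int) × Int × String := ([[0, 2], [2, 0]], 2, "left")

def Spec_set_arr (temp_arr : List (List Int)) (N : Int) (dr : String) (out : Option (List (List Int))) : Prop := out = set_arr_alt temp_arr N dr
instance (temp_arr : List (List Int)) (N : Int) (dr : String) (out : Option (List (List Int))) : Decidable (Spec_set_arr temp_arr N dr out) := by unfold Spec_set_arr; infer_instance

-- ===== CLAIM (what is proved, stated in full; the proofs are below) =====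
def Claim_equal_set_arr : Prop := ∀ (temp_arr : List (List Int)) (N : Int) (dr : String), Dom_set_arr temp_arr N dr → Pre_set_arr temp_arr N dr → Spec_set_arr temp_arr N dr (set_arr temp_arr N dr)

-- ===== LEMMAS AND PROOFS =====

def pvApplyF {α : Type} (s : List α) (i : Nat) (fs : List (α → α)) : List α :=
  match fs with
  | [] => s
  | f :: fs => pvApplyF (s.modify i f) (i + 1) fs

theorem pvApplyF_getElem? {α : Type} (fs : List (α → α)) (s : List α) (i j : Nat) :
    (pvApplyF s i fs)[j]? =
      if i ≤ j ∧ j < i + fs.length then (s[j]?).map (fs.getD (j - i) id) else s[j]? := by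
  induction fs generalizing s i with
  | nil => simp [pvApplyF]
  | cons f fs ih =>
    rw [pvApplyF, ih, List.getElem?_modify]
    rcases lt_trichotomy j i with h | h | h
    · rw [if_neg (by omega), if_neg (by simp only [List.length_cons]; omega)]
      cases s[j]? <;> simp [show ¬ i = j by omega]
    · subst h
      rw [if_neg (by omega), if_pos (by simp only [List.length_cons]; omega)]
      cases s[j]? <;> simp
    · have he : (f :: fs)[j - i]? = fs[j - i - 1]? := by
        obtain ⟨k, hk⟩ : ∃ k, j - i = k + 1 := ⟨j - i - 1, by omega⟩
        rw [hk, List.getElem?_cons_succ, show k = j - i - 1 by omega, Nat.add_sub_cancel]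
      by_cases hc : i + 1 ≤ j ∧ j < i + 1 + fs.length
      · rw [if_pos hc, if_pos (by simp only [List.length_cons]; omega)]
        cases s[j]? <;> simp [show ¬ i = j by omega, he, show j - (i+1) = j - i - 1 by omega]
      · rw [if_neg hc, if_neg (by simp only [List.length_cons]; omega)]
        cases s[j]? <;> simp [show ¬ i = j by omega]

def pvApplyB {α : Type} (s : List α) (i : Nat) (fs : List (α → α)) : List α :=
  match fs with
  | [] => s
  | f :: fs => pvApplyB (s.modify i f) (i - 1) fs

theorem pvApplyB_getElem? {α : Type} (fs : List (α → α)) (s : List α) (i j : Nat)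
    (hfs : fs.length ≤ i + 1) :
    (pvApplyB s i fs)[j]? =
      if i + 1 - fs.length ≤ j ∧ j ≤ i ∧ fs ≠ [] then (s[j]?).map (fs.getD (i - j) id) else s[j]? := by
  induction fs generalizing s i with
  | nil => simp [pvApplyB]
  | cons f fs ih =>
    have hlen : fs.length ≤ (i - 1) + 1 := by
      cases fs with
      | nil => simp
      | cons g gs => simp only [List.length_cons] at hfs ⊢; omega
    rw [pvApplyB, ih _ _ hlen, List.getElem?_modify]
    rcases lt_trichotomy j i with h | h | h
    · by_cases hnil : fs = []
      · subst hnil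
        rw [if_neg (by simp), if_neg (by simp only [List.length_cons, List.length_nil]; omega)]
        cases s[j]? <;> simp [show ¬ i = j by omega]
      · have hi1 : 1 ≤ i := by
          cases fs with
          | nil => exact absurd rfl hnil
          | cons g gs => simp only [List.length_cons] at hfs; omega
        have he : (f :: fs)[i - j]? = fs[i - 1 - j]? := by
          obtain ⟨k, hk⟩ : ∃ k, i - j = k + 1 := ⟨i - j - 1, by omega⟩
          rw [hk, List.getElem?_cons_succ, show k = i - 1 - j by omega]
        by_cases hc : i - 1 + 1 - fs.length ≤ j ∧ j ≤ i - 1 ∧ fs ≠ []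
        · rw [if_pos hc, if_pos (by simp only [List.length_cons]; refine ⟨by omega, by omega, by simp⟩)]
          cases s[j]? <;> simp [show ¬ i = j by omega, he]
        · rw [if_neg hc, if_neg (by
            simp only [List.length_cons]
            intro hcon
            exact hc ⟨by omega, by omega, hnil⟩)]
          cases s[j]? <;> simp [show ¬ i = j by omega]
    · subst h
      rw [if_neg (by
          rintro ⟨-, h2, h3⟩
          have : 1 ≤ fs.length := by cases fs with | nil => exact absurd rfl h3 | cons g gs => simp
          simp only [List.length_cons] at hfs
          omega),
        if_pos (by simp only [List.length_cons]; exact ⟨by omega, le_refl _, by simp⟩)]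
      cases s[j]? <;> simp
    · rw [if_neg (by rintro ⟨-, h2, -⟩; omega),
          if_neg (by simp only [List.length_cons]; rintro ⟨-, h2, -⟩; omega)]
      cases s[j]? <;> simp [show ¬ i = j by omega]

theorem pvFoldInc {α : Type} (h : Int → α → α) (L : List Int) (s : List α) (idx : Int)
    (h0 : 0 ≤ idx) :
    L.foldl (fun (st : List α × Int) v =>
        if v ≠ 0 then (st.1.modify st.2.toNat (h v), st.2 + 1) else st) (s, idx)
      = (pvApplyF s idx.toNat ((L.filter (fun v => decide (v ≠ 0))).map h),
         idx + ((L.filter (fun v => decide (v ≠ 0))).length : Int)) := by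
  induction L generalizing s idx with
  | nil => simp [pvApplyF]
  | cons v L ih =>
    by_cases hv : v ≠ 0
    · rw [List.foldl_cons, if_pos hv]
      rw [ih _ (idx + 1) (by omega)]
      rw [List.filter_cons_of_pos (by simpa using hv)]
      simp only [List.map_cons, List.length_cons, pvApplyF]
      simp only [Prod.mk.injEq]
      exact ⟨by rw [show (idx + 1).toNat = idx.toNat + 1 by omega], by push_cast; ring⟩
    · rw [List.foldl_cons, if_neg hv, ih _ _ h0,
        List.filter_cons_of_neg (by simpa using hv)]

theorem pvFoldDec {α : Type} (h : Int → α → α) (L : List Int) (s : List α) (idx : Int)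
    (hm : ((L.filter (fun v => decide (v ≠ 0))).length : Int) ≤ idx + 1) :
    L.foldl (fun (st : List α × Int) v =>
        if v ≠ 0 then (st.1.modify st.2.toNat (h v), st.2 - 1) else st) (s, idx)
      = (pvApplyB s idx.toNat ((L.filter (fun v => decide (v ≠ 0))).map h),
         idx - ((L.filter (fun v => decide (v ≠ 0))).length : Int)) := by
  induction L generalizing s idx with
  | nil => simp [pvApplyB]
  | cons v L ih =>
    by_cases hv : v ≠ 0
    · rw [List.filter_cons_of_pos (by simpa using hv)] at hm ⊢
      simp only [List.length_cons] at hm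
      have h0 : 0 ≤ idx := by push_cast at hm; omega
      rw [List.foldl_cons, if_pos hv]
      rw [ih _ (idx - 1) (by push_cast at hm ⊢; omega)]
      simp only [List.map_cons, List.length_cons, pvApplyB]
      simp only [Prod.mk.injEq]
      exact ⟨by rw [show (idx - 1).toNat = idx.toNat - 1 by omega], by push_cast; ring⟩
    · rw [List.filter_cons_of_neg (by simpa using hv)] at hm ⊢
      rw [List.foldl_cons, if_neg hv, ih _ _ hm]

theorem pvModifyModify {α : Type} (l : List α) (i : Nat) (f g : α → α) :
    (l.modify i f).modify i g = l.modify i (fun x => g (f x)) := by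
  apply List.ext_getElem?
  intro j
  simp only [List.getElem?_modify]
  cases l[j]? <;> by_cases h : i = j <;> simp [h]

theorem pvSetModify {α : Type} (l : List α) (i : Nat) (v : α) :
    l.set i v = l.modify i (fun _ => v) := by
  apply List.ext_getElem?
  intro j
  simp only [List.getElem?_set, List.getElem?_modify]
  by_cases h : i = j
  · subst h
    by_cases hl : i < l.length
    · rw [if_pos rfl, if_pos hl, List.getElem?_eq_getElem hl]
      simp
    · rw [if_pos rfl, if_neg hl, List.getElem?_eq_none (by omega)]
      simp
  · rw [if_neg h]
    cases l[j]? <;> simp [h]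

theorem pvModifyId {α : Type} (l : List α) (i : Nat) :
    l.modify i (fun x => x) = l := by
  apply List.ext_getElem?
  intro j
  simp only [List.getElem?_modify]
  cases l[j]? <;> by_cases h : i = j <;> simp [h]

theorem pvRangeCast (N : Int) :
    PySem.List.pyRange 0 N = List.map (fun k : Nat => (k : Int)) (List.range N.toNat) := by
  rw [PySem.List.pyRange_one]
  simp only [zero_add, sub_zero]

theorem pvFoldRow (δ : Int → Int) (L : List Int) (g : List (List Int)) (r : Nat) (idx : Int) :
    L.foldl (fun (st : List (List Int) × Int) v =>
        if v ≠ 0 then (st.1.modify r (fun row => row.set st.2.toNat v), δ st.2) else st) (g, idx)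
      = (g.modify r (fun row =>
           (L.foldl (fun (st : List Int × Int) v =>
              if v ≠ 0 then (st.1.set st.2.toNat v, δ st.2) else st) (row, idx)).1),
         L.foldl (fun i v => if v ≠ 0 then δ i else i) idx) := by
  induction L generalizing g idx with
  | nil => simp [pvModifyId]
  | cons v L ih =>
    by_cases hv : v ≠ 0
    · simp only [List.foldl_cons, if_pos hv]
      rw [ih, pvModifyModify]
    · simp only [List.foldl_cons, if_neg hv]
      exact ih g idx

theorem pvFoldIncMap {α γ : Type} (h : Int → α → α) (val : γ → Int) (L : List γ)
    (s : List α) (idx : Int) (h0 : 0 ≤ idx) :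
    L.foldl (fun (st : List α × Int) c =>
        if val c ≠ 0 then (st.1.modify st.2.toNat (h (val c)), st.2 + 1) else st) (s, idx)
      = (pvApplyF s idx.toNat (((L.map val).filter (fun v => decide (v ≠ 0))).map h),
         idx + (((L.map val).filter (fun v => decide (v ≠ 0))).length : Int)) := by
  rw [← pvFoldInc h (L.map val) s idx h0, List.foldl_map]

theorem pvFoldDecMap {α γ : Type} (h : Int → α → α) (val : γ → Int) (L : List γ)
    (s : List α) (idx : Int)
    (hm : (((L.map val).filter (fun v => decide (v ≠ 0))).length : Int) ≤ idx + 1) :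
    L.foldl (fun (st : List α × Int) c =>
        if val c ≠ 0 then (st.1.modify st.2.toNat (h (val c)), st.2 - 1) else st) (s, idx)
      = (pvApplyB s idx.toNat (((L.map val).filter (fun v => decide (v ≠ 0))).map h),
         idx - (((L.map val).filter (fun v => decide (v ≠ 0))).length : Int)) := by
  rw [← pvFoldDec h (L.map val) s idx hm, List.foldl_map]

theorem pvFoldRowMap {γ : Type} (δ : Int → Int) (val : γ → Int) (L : List γ)
    (g : List (List Int)) (r : Nat) (idx : Int) :
    L.foldl (fun (st : List (List Int) × Int) c =>
        if val c ≠ 0 then (st.1.modify r (fun row => row.set st.2.toNat (val c)), δ st.2) else st) (g, idx)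
      = (g.modify r (fun row =>
           ((L.map val).foldl (fun (st : List Int × Int) v =>
              if v ≠ 0 then (st.1.set st.2.toNat v, δ st.2) else st) (row, idx)).1),
         (L.map val).foldl (fun i v => if v ≠ 0 then δ i else i) idx) := by
  rw [← pvFoldRow δ (L.map val) g r idx, List.foldl_map]

theorem pvOuterRow (F : Nat → List Int → List Int) (n : Nat) (g : List (List Int)) (j : Nat) :
    ((List.range n).foldl (fun g k => g.modify k (F k)) g)[j]? =
      if j < n then g[j]?.map (F j) else g[j]? := by
  induction n with
  | zero => simp
  | succ n ih =>
    rw [List.range_succ, List.foldl_append, List.foldl_cons, List.foldl_nil,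
      List.getElem?_modify, ih]
    rcases lt_trichotomy j n with h | h | h
    · rw [if_pos h, if_pos (by omega)]
      cases g[j]? <;> simp [show ¬ n = j by omega]
    · subst h
      rw [if_neg (by omega), if_pos (by omega)]
      cases g[j]? <;> simp
    · rw [if_neg (by omega), if_neg (by omega)]
      cases g[j]? <;> simp [show ¬ n = j by omega]

theorem pvApplyF_row (nz : List Int) (n : Nat) (hm : nz.length ≤ n) :
    pvApplyF (List.replicate n (0 : Int)) 0 (nz.map (fun v => fun (_ : Int) => v))
      = nz ++ List.replicate (n - nz.length) 0 := by
  apply List.ext_getElem?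
  intro j
  rw [pvApplyF_getElem?]
  simp only [List.length_map, Nat.zero_add, Nat.zero_le, true_and, Nat.sub_zero]
  by_cases h1 : j < nz.length
  · rw [if_pos h1, List.getElem?_append_left h1, List.getElem?_replicate, if_pos (by omega),
      List.getElem?_eq_getElem h1]
    simp only [Option.map_some, Option.some.injEq]
    rw [List.getD_eq_getElem?_getD, List.getElem?_map, List.getElem?_eq_getElem h1]
    rfl
  · rw [if_neg h1, List.getElem?_append_right (by omega), List.getElem?_replicate,
      List.getElem?_replicate]
    by_cases h2 : j < n
    · rw [if_pos h2, if_pos (by omega)]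
    · rw [if_neg h2, if_neg (by omega)]

theorem pvApplyB_row (nz : List Int) (n : Nat) (hm : nz.length ≤ n) :
    pvApplyB (List.replicate n (0 : Int)) (n - 1) ((nz.reverse).map (fun v => fun (_ : Int) => v))
      = List.replicate (n - nz.length) 0 ++ nz := by
  cases hnz : nz.length with
  | zero =>
    rw [List.eq_nil_of_length_eq_zero hnz]
    simp [pvApplyB]
  | succ m' =>
    have hn1 : 1 ≤ n := by omega
    apply List.ext_getElem?
    intro j
    rw [pvApplyB_getElem? _ _ _ _ (by simp [hnz]; omega)]
    simp only [List.length_map, List.length_reverse, hnz]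
    have hne : (nz.reverse).map (fun v => fun (_ : Int) => v) ≠ [] := by
      simp only [ne_eq, List.map_eq_nil_iff, List.reverse_eq_nil_iff]
      intro hcon
      rw [hcon] at hnz
      simp at hnz
    by_cases h1 : n - (m' + 1) ≤ j ∧ j < n
    · rw [if_pos ⟨by omega, by omega, hne⟩,
        List.getElem?_append_right (by simp; omega), List.getElem?_replicate, if_pos (by omega)]
      simp only [List.length_replicate, Option.map_some, Option.some.injEq]
      rw [List.getD_eq_getElem?_getD, List.getElem?_map,
        List.getElem?_reverse (by omega : n - 1 - j < nz.length),
        show nz.length - 1 - (n - 1 - j) = j - (n - (m' + 1)) by omega,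
        List.getElem?_eq_getElem (by omega : j - (n - (m' + 1)) < nz.length)]
      rfl
    · rw [if_neg (by rintro ⟨ha, hb, -⟩; exact h1 ⟨by omega, by omega⟩), List.getElem?_replicate]
      by_cases h2 : j < n
      · rw [if_pos h2, List.getElem?_append_left (by simp; omega), List.getElem?_replicate,
          if_pos (by omega)]
      · rw [if_neg h2, List.getElem?_eq_none (by simp; omega)]

theorem pvUpAux (nz : Nat → List Int) (n : Nat) (hnz : ∀ j, (nz j).length ≤ n) :
    ∀ k, k ≤ n →
    (List.range k).foldl (fun arr r => pvApplyF arr 0 ((nz r).map (fun v => fun row => row.set r v)))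
        (List.map (fun _ : Nat => List.replicate n (0 : Int)) (List.range n))
      = (List.range n).map (fun i => (List.range n).map (fun j => if j < k then (nz j).getD i 0 else (0 : Int))) := by
  intro k
  induction k with
  | zero =>
    intro _
    simp only [List.range_zero, List.foldl_nil]
    apply List.map_congr_left
    intro i _
    apply List.ext_getElem?
    intro c
    simp only [List.getElem?_map, List.getElem?_replicate]
    by_cases hc : c < n
    · rw [if_pos hc, List.getElem?_range hc]
      simp
    · rw [if_neg hc, List.getElem?_eq_none (by simpa using hc)]
      rfl
  | succ k ih =>
    intro hk
    rw [List.range_succ, List.foldl_append, List.foldl_cons, List.foldl_nil, ih (by omega)]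
    apply List.ext_getElem?
    intro i
    rw [pvApplyF_getElem?]
    simp only [List.length_map, Nat.zero_add, Nat.zero_le, true_and, Nat.sub_zero,
      List.getElem?_map]
    by_cases hi : i < n
    · rw [List.getElem?_range hi]
      simp only [Option.map_some, Option.some.injEq]
      by_cases him : i < (nz k).length
      · rw [if_pos him]
        have hfs : ((nz k).map (fun v => fun row => row.set k v)).getD i id
            = fun (row : List Int) => row.set k ((nz k).getD i 0) := by
          rw [List.getD_eq_getElem?_getD, List.getElem?_map, List.getElem?_eq_getElem him,
            List.getD_eq_getElem?_getD, List.getElem?_eq_getElem him]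
          rfl
        rw [hfs]
        simp only [Option.map_some, Option.some.injEq]
        apply List.ext_getElem?
        intro c
        rw [List.getElem?_set]
        simp only [List.length_map, List.length_range, List.getElem?_map]
        by_cases hck : k = c
        · subst hck
          rw [if_pos rfl, if_pos (by omega), List.getElem?_range (by omega)]
          simp only [Option.map_some, Option.some.injEq]
          rw [if_pos (by omega)]
        · rw [if_neg hck]
          by_cases hc : c < n
          · rw [List.getElem?_range hc]
            simp only [List.getElem?_map, List.getElem?_range hc, Option.map_some,
              Option.some.injEq]
            by_cases hck2 : c < k
            · rw [if_pos hck2, if_pos (by omega)]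
            · rw [if_neg hck2, if_neg (by omega)]
          · rw [List.getElem?_eq_none (show (List.range n).length ≤ c by simpa using hc)]
            rfl
      · rw [if_neg him]
        simp only [Option.some.injEq]
        apply List.ext_getElem?
        intro c
        simp only [List.getElem?_map]
        by_cases hc : c < n
        · rw [List.getElem?_range hc]
          simp only [Option.map_some, Option.some.injEq]
          by_cases hck : c = k
          · subst hck
            rw [if_neg (by omega), if_pos (by omega), List.getD_eq_default _ _ (by omega)]
          · by_cases hck2 : c < k
            · rw [if_pos hck2, if_pos (by omega)]
            · rw [if_neg hck2, if_neg (by omega)]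
        · rw [List.getElem?_eq_none (show (List.range n).length ≤ c by simpa using hc)]
          rfl
    · rw [List.getElem?_eq_none (show (List.range n).length ≤ i by simpa using hi)]
      rw [if_neg (by have := hnz k; omega)]
      rfl

theorem pvDownAux (nz : Nat → List Int) (n : Nat) (hnz : ∀ j, (nz j).length ≤ n) :
    ∀ k, k ≤ n →
    (List.range k).foldl (fun arr r =>
        pvApplyB arr (n - 1) (((nz r).reverse).map (fun v => fun (row : List Int) => row.set r v)))
        (List.map (fun _ : Nat => List.replicate n (0 : Int)) (List.range n))
      = (List.range n).map (fun i => (List.range n).map (fun j =>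
          if j < k then (List.replicate (n - (nz j).length) (0 : Int) ++ nz j).getD i 0 else (0 : Int))) := by
  intro k
  induction k with
  | zero =>
    intro _
    simp only [List.range_zero, List.foldl_nil]
    apply List.map_congr_left
    intro i _
    apply List.ext_getElem?
    intro c
    simp only [List.getElem?_map, List.getElem?_replicate]
    by_cases hc : c < n
    · rw [if_pos hc, List.getElem?_range hc]
      simp
    · rw [if_neg hc, List.getElem?_eq_none (by simpa using hc)]
      rfl
  | succ k ih =>
    intro hk
    have hn1 : 1 ≤ n := by omega
    have hmn : (nz k).length ≤ n := hnz k
    rw [List.range_succ, List.foldl_append, List.foldl_cons, List.foldl_nil, ih (by omega)]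
    apply List.ext_getElem?
    intro i
    rw [pvApplyB_getElem? _ _ _ _ (by simp only [List.length_map, List.length_reverse]; omega)]
    simp only [List.length_map, List.length_reverse, List.getElem?_map]
    by_cases hi : i < n
    · rw [List.getElem?_range hi]
      simp only [Option.map_some, Option.some.injEq]
      by_cases hact : n - (nz k).length ≤ i ∧ 1 ≤ (nz k).length
      · have hne : ((nz k).reverse).map (fun v => fun (row : List Int) => row.set k v) ≠ [] := by
          simp only [ne_eq, List.map_eq_nil_iff, List.reverse_eq_nil_iff]
          intro hcon
          rw [hcon] at hact
          simp at hact
        rw [if_pos ⟨by omega, by omega, hne⟩]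
        have hrev : n - 1 - i < (nz k).length := by omega
        have hfs : (((nz k).reverse).map (fun v => fun (row : List Int) => row.set k v)).getD (n - 1 - i) id
            = fun (row : List Int) => row.set k ((nz k).getD (i - (n - (nz k).length)) 0) := by
          rw [List.getD_eq_getElem?_getD, List.getElem?_map,
            List.getElem?_reverse (by simpa using hrev),
            show (nz k).length - 1 - (n - 1 - i) = i - (n - (nz k).length) by omega,
            List.getD_eq_getElem?_getD]
          rw [List.getElem?_eq_getElem (by omega : i - (n - (nz k).length) < (nz k).length)]
          rfl
        rw [hfs]
        simp only [Option.map_some, Option.some.injEq]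
        apply List.ext_getElem?
        intro c
        rw [List.getElem?_set]
        simp only [List.length_map, List.length_range, List.getElem?_map]
        by_cases hck : k = c
        · subst hck
          rw [if_pos rfl, if_pos (by omega), List.getElem?_range (by omega)]
          simp only [Option.map_some, Option.some.injEq]
          rw [if_pos (by omega), List.getD_eq_getElem?_getD, List.getD_eq_getElem?_getD,
            List.getElem?_append_right (by simp only [List.length_replicate]; omega)]
          simp only [List.length_replicate]
        · rw [if_neg hck]
          by_cases hc : c < n
          · rw [List.getElem?_range hc]
            simp only [List.getElem?_map, List.getElem?_range hc, Option.map_some,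
              Option.some.injEq]
            by_cases hck2 : c < k
            · rw [if_pos hck2, if_pos (by omega)]
            · rw [if_neg hck2, if_neg (by omega)]
          · rw [List.getElem?_eq_none (show (List.range n).length ≤ c by simpa using hc)]
            rfl
      · rw [if_neg (by
          rintro ⟨h1, h2, h3⟩
          apply hact
          constructor
          · omega
          · rcases Nat.eq_zero_or_pos (nz k).length with h0 | h0
            · exact absurd (by simp [List.eq_nil_of_length_eq_zero h0]) h3
            · omega)]
        simp only [Option.some.injEq]
        apply List.ext_getElem?
        intro c
        simp only [List.getElem?_map]
        by_cases hc : c < n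
        · rw [List.getElem?_range hc]
          simp only [Option.map_some, Option.some.injEq]
          by_cases hck : c = k
          · subst hck
            rw [if_neg (by omega), if_pos (by omega), List.getD_eq_getElem?_getD]
            by_cases hm0 : 1 ≤ (nz c).length
            · rw [List.getElem?_append_left (by simp only [List.length_replicate]; omega),
                List.getElem?_replicate, if_pos (by omega)]
              rfl
            · rw [List.getElem?_append_left (by simp only [List.length_replicate]; omega),
                List.getElem?_replicate, if_pos (by omega)]
              rfl
          · by_cases hck2 : c < k
            · rw [if_pos hck2, if_pos (by omega)]
            · rw [if_neg hck2, if_neg (by omega)]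
        · rw [List.getElem?_eq_none (show (List.range n).length ≤ c by simpa using hc)]
          rfl
    · rw [List.getElem?_eq_none (show (List.range n).length ≤ i by simpa using hi)]
      rw [if_neg (by rintro ⟨-, h2, -⟩; omega)]
      rfl

theorem pvLeftCase (t : List (List Int)) (N : Int) :
    set_arr t N "left" = set_arr_alt t N "left" := by
  rw [set_arr, set_arr_alt]
  rw [if_neg (by decide), if_neg (by decide), if_pos rfl,
    if_neg (by simp), if_pos (Or.inl rfl)]
  by_cases hN : N ≤ 0
  · simp [pvZero, PySem.List.pyRange_one_eq_nil hN]
  · have hn : ((N.toNat : Nat) : Int) = N := Int.toNat_of_nonneg (by omega)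
    simp only [pvZero, pvRangeCast, List.foldl_map, List.map_map, Function.comp]
    congr 1
    have hstep : ∀ (arr : List (List Int)) (r : Nat),
        ((List.range N.toNat).foldl (fun (st : List (List Int) × Int) (c : Nat) =>
          if pvCell t ↑r ↑c ≠ 0 then (pvWrite st.1 ↑r st.2 (pvCell t ↑r ↑c), st.2 + 1) else st)
          (arr, (0 : Int))).1
        = arr.modify r (fun row => pvApplyF row 0
            ((((List.range N.toNat).map (fun c : Nat => pvCell t ↑r ↑c)).filter
                (fun v => decide (v ≠ 0))).map (fun v => fun (_ : Int) => v))) := by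
      intro arr r
      simp only [pvWrite, Int.toNat_natCast]
      rw [pvFoldRowMap (fun i => i + 1) (fun c : Nat => pvCell t ↑r ↑c)]
      have hrow : ∀ row : List Int,
          (((List.range N.toNat).map (fun c : Nat => pvCell t ↑r ↑c)).foldl
            (fun (st : List Int × Int) v =>
              if v ≠ 0 then (st.1.set st.2.toNat v, st.2 + 1) else st) (row, (0 : Int))).1
          = pvApplyF row 0
            ((((List.range N.toNat).map (fun c : Nat => pvCell t ↑r ↑c)).filter
                (fun v => decide (v ≠ 0))).map (fun v => fun (_ : Int) => v)) := by
        intro row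
        simp only [pvSetModify]
        rw [pvFoldInc (fun v => fun (_ : Int) => v) _ _ 0 (le_refl 0)]
        rfl
      simp only [hrow]
    rw [PySem.List.foldl_congr_mem _ _ _ _ (fun arr r _ => hstep arr r)]
    have hmj : ∀ r : Nat,
        (((List.range N.toNat).map (fun c : Nat => pvCell t ↑r ↑c)).filter
          (fun v => decide (v ≠ 0))).length ≤ N.toNat := by
      intro r
      calc (((List.range N.toNat).map (fun c : Nat => pvCell t ↑r ↑c)).filter
          (fun v => decide (v ≠ 0))).length
          ≤ ((List.range N.toNat).map (fun c : Nat => pvCell t ↑r ↑c)).length :=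
            List.length_filter_le _ _
        _ = N.toNat := by simp
    apply List.ext_getElem?
    intro j
    rw [pvOuterRow]
    simp only [List.getElem?_map, Function.comp_apply]
    by_cases hj : j < N.toNat
    · rw [List.getElem?_range hj]
      simp only [Option.map_some, Option.some.injEq, Function.comp]
      rw [pvApplyF_row _ _ (hmj j), pvSlide]
      simp only [if_neg (by decide : ¬ (("left" : String) = "down" ∨ ("left" : String) = "right"))]
      rw [if_pos hj]
      simp only [Function.comp_def]
      have hlen : ((N - (((List.range N.toNat).map (fun c : Nat => pvCell t ↑j ↑c)).filter
            (fun v => decide (v ≠ 0))).length).toNat)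
          = N.toNat - (((List.range N.toNat).map (fun c : Nat => pvCell t ↑j ↑c)).filter
            (fun v => decide (v ≠ 0))).length := by omega
      rw [hlen]
    · rw [List.getElem?_eq_none (show (List.range N.toNat).length ≤ j by simpa using hj)]
      simp

theorem pvRightCase (t : List (List Int)) (N : Int) :
    set_arr t N "right" = set_arr_alt t N "right" := by
  rw [set_arr, set_arr_alt]
  rw [if_neg (by decide), if_neg (by decide), if_neg (by decide), if_pos rfl,
    if_neg (by simp), if_pos (Or.inr rfl)]
  by_cases hN : N ≤ 0
  · simp [pvZero, PySem.List.pyRange_one_eq_nil hN]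
  · have hn : ((N.toNat : Nat) : Int) = N := Int.toNat_of_nonneg (by omega)
    simp only [pvZero, PySem.List.pyRange_neg_one_eq_reverse,
      show (-1 : Int) + 1 = 0 by ring, show N - 1 + 1 = N by ring,
      pvRangeCast, ← List.map_reverse, List.foldl_map, List.map_map, Function.comp_def]
    congr 1
    have hstep : ∀ (arr : List (List Int)) (r : Nat),
        (((List.range N.toNat).reverse).foldl (fun (st : List (List Int) × Int) (c : Nat) =>
          if pvCell t ↑r ↑c ≠ 0 then (pvWrite st.1 ↑r st.2 (pvCell t ↑r ↑c), st.2 - 1) else st)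
          (arr, N - 1)).1
        = arr.modify r (fun row => pvApplyB row (N.toNat - 1)
            (((((List.range N.toNat).map (fun c : Nat => pvCell t ↑r ↑c)).filter
                (fun v => decide (v ≠ 0))).reverse).map (fun v => fun (_ : Int) => v))) := by
      intro arr r
      simp only [pvWrite, Int.toNat_natCast]
      rw [pvFoldRowMap (fun i => i - 1) (fun c : Nat => pvCell t ↑r ↑c)]
      have hrow : ∀ row : List Int,
          ((((List.range N.toNat).reverse).map (fun c : Nat => pvCell t ↑r ↑c)).foldl
            (fun (st : List Int × Int) v =>
              if v ≠ 0 then (st.1.set st.2.toNat v, st.2 - 1) else st) (row, N - 1)).1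
          = pvApplyB row (N - 1).toNat
            (((((List.range N.toNat).map (fun c : Nat => pvCell t ↑r ↑c)).filter
                (fun v => decide (v ≠ 0))).reverse).map (fun v => fun (_ : Int) => v)) := by
        intro row
        simp only [pvSetModify]
        rw [pvFoldDec (fun v => fun (_ : Int) => v) _ _ (N - 1) (by
          calc (((((List.range N.toNat).reverse).map (fun c : Nat => pvCell t ↑r ↑c)).filter
              (fun v => decide (v ≠ 0))).length : Int)
              ≤ ((((List.range N.toNat).reverse).map (fun c : Nat => pvCell t ↑r ↑c)).length : Int) := by
                exact_mod_cast List.length_filter_le _ _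
            _ ≤ N - 1 + 1 := by simp [hn])]
        rw [List.map_reverse, List.filter_reverse]
      simp only [hrow]
      have hreq : ∀ row : List Int, pvApplyB row (N - 1).toNat
            (((((List.range N.toNat).map (fun c : Nat => pvCell t ↑r ↑c)).filter
                (fun v => decide (v ≠ 0))).reverse).map (fun v => fun (_ : Int) => v))
          = pvApplyB row (N.toNat - 1)
            (((((List.range N.toNat).map (fun c : Nat => pvCell t ↑r ↑c)).filter
                (fun v => decide (v ≠ 0))).reverse).map (fun v => fun (_ : Int) => v)) := by
        intro row
        rw [show (N - 1).toNat = N.toNat - 1 by omega]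
      simp only [hreq]
    rw [PySem.List.foldl_congr_mem _ _ _ _ (fun arr r _ => hstep arr r)]
    have hmj : ∀ r : Nat,
        (((List.range N.toNat).map (fun c : Nat => pvCell t ↑r ↑c)).filter
          (fun v => decide (v ≠ 0))).length ≤ N.toNat := by
      intro r
      calc (((List.range N.toNat).map (fun c : Nat => pvCell t ↑r ↑c)).filter
          (fun v => decide (v ≠ 0))).length
          ≤ ((List.range N.toNat).map (fun c : Nat => pvCell t ↑r ↑c)).length :=
            List.length_filter_le _ _
        _ = N.toNat := by simp
    apply List.ext_getElem?
    intro j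
    rw [pvOuterRow]
    simp only [List.getElem?_map]
    by_cases hj : j < N.toNat
    · rw [List.getElem?_range hj]
      simp only [Option.map_some, Option.some.injEq, Function.comp]
      rw [pvApplyB_row _ _ (hmj j), pvSlide]
      rw [if_pos hj, if_pos (Or.inr rfl : ("right" : String) = "down" ∨ ("right" : String) = "right")]
      have hlen : ((N - (((List.range N.toNat).map (fun c : Nat => pvCell t ↑j ↑c)).filter
            (fun v => decide (v ≠ 0))).length).toNat)
          = N.toNat - (((List.range N.toNat).map (fun c : Nat => pvCell t ↑j ↑c)).filter
            (fun v => decide (v ≠ 0))).length := by omega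
      rw [hlen]
    · rw [List.getElem?_eq_none (show (List.range N.toNat).length ≤ j by simpa using hj)]
      simp

theorem pvUpCase (t : List (List Int)) (N : Int) :
    set_arr t N "up" = set_arr_alt t N "up" := by
  rw [set_arr, set_arr_alt]
  rw [if_pos rfl, if_neg (by simp), if_neg (by decide)]
  by_cases hN : N ≤ 0
  · simp [pvZero, PySem.List.pyRange_one_eq_nil hN]
  · have hn : ((N.toNat : Nat) : Int) = N := Int.toNat_of_nonneg (by omega)
    simp only [pvZero, pvRangeCast, List.foldl_map, List.map_map, Function.comp_def]
    congr 1
    have hstep : ∀ (arr : List (List Int)) (r : Nat),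
        ((List.range N.toNat).foldl (fun (st : List (List Int) × Int) (c : Nat) =>
          if pvCell t ↑c ↑r ≠ 0 then (pvWrite st.1 st.2 ↑r (pvCell t ↑c ↑r), st.2 + 1) else st)
          (arr, (0 : Int))).1
        = pvApplyF arr 0 ((((List.range N.toNat).map (fun c : Nat => pvCell t ↑c ↑r)).filter
            (fun v => decide (v ≠ 0))).map (fun v => fun (row : List Int) => row.set r v)) := by
      intro arr r
      simp only [pvWrite, Int.toNat_natCast]
      rw [pvFoldIncMap (fun v => fun (row : List Int) => row.set r v)
        (fun c : Nat => pvCell t ↑c ↑r) _ _ 0 (le_refl 0)]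
      rfl
    rw [PySem.List.foldl_congr_mem _ _ _ _ (fun arr r _ => hstep arr r)]
    have hnz : ∀ r : Nat,
        (((List.range N.toNat).map (fun c : Nat => pvCell t ↑c ↑r)).filter
          (fun v => decide (v ≠ 0))).length ≤ N.toNat := by
      intro r
      calc (((List.range N.toNat).map (fun c : Nat => pvCell t ↑c ↑r)).filter
          (fun v => decide (v ≠ 0))).length
          ≤ ((List.range N.toNat).map (fun c : Nat => pvCell t ↑c ↑r)).length :=
            List.length_filter_le _ _
        _ = N.toNat := by simp
    rw [pvUpAux _ _ hnz N.toNat (le_refl _)]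
    apply List.map_congr_left
    intro i hi
    apply List.map_congr_left
    intro j hj
    rw [List.mem_range] at hi hj
    rw [if_pos hj]
    have hcols : PySem.List.pyGetD ((List.range N.toNat).map (fun r : Nat =>
          pvSlide N "up" ((List.range N.toNat).map (fun c : Nat => pvCell t ↑c ↑r)))) ↑j []
        = pvSlide N "up" ((List.range N.toNat).map (fun c : Nat => pvCell t ↑c ↑j)) := by
      rw [PySem.List.pyGetD_natCast, List.getD_eq_getElem?_getD, List.getElem?_map,
        List.getElem?_range hj]
      rfl
    rw [hcols, PySem.List.pyGetD_natCast, pvSlide]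
    simp only [if_neg (by decide : ¬ (("up" : String) = "down" ∨ ("up" : String) = "right"))]
    rw [List.getD_eq_getElem?_getD, List.getD_eq_getElem?_getD]
    by_cases him : i < (((List.range N.toNat).map (fun c : Nat => pvCell t ↑c ↑j)).filter
        (fun v => decide (v ≠ 0))).length
    · rw [List.getElem?_append_left him]
    · rw [List.getElem?_append_right (by omega), List.getElem?_replicate,
        List.getElem?_eq_none (by omega)]
      rw [if_pos (by have := hnz j; omega)]
      rfl

theorem pvDownCase (t : List (List Int)) (N : Int) :
    set_arr t N "down" = set_arr_alt t N "down" := by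
  rw [set_arr, set_arr_alt]
  rw [if_neg (by decide), if_pos rfl, if_neg (by simp), if_neg (by decide)]
  by_cases hN : N ≤ 0
  · simp [pvZero, PySem.List.pyRange_one_eq_nil hN]
  · have hn : ((N.toNat : Nat) : Int) = N := Int.toNat_of_nonneg (by omega)
    simp only [pvZero, PySem.List.pyRange_neg_one_eq_reverse,
      show (-1 : Int) + 1 = 0 by ring, show N - 1 + 1 = N by ring,
      pvRangeCast, ← List.map_reverse, List.foldl_map, List.map_map, Function.comp_def]
    congr 1
    have hstep : ∀ (arr : List (List Int)) (r : Nat),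
        (((List.range N.toNat).reverse).foldl (fun (st : List (List Int) × Int) (c : Nat) =>
          if pvCell t ↑c ↑r ≠ 0 then (pvWrite st.1 st.2 ↑r (pvCell t ↑c ↑r), st.2 - 1) else st)
          (arr, N - 1)).1
        = pvApplyB arr (N.toNat - 1) (((((List.range N.toNat).map (fun c : Nat => pvCell t ↑c ↑r)).filter
            (fun v => decide (v ≠ 0))).reverse).map (fun v => fun (row : List Int) => row.set r v)) := by
      intro arr r
      simp only [pvWrite, Int.toNat_natCast]
      rw [pvFoldDecMap (fun v => fun (row : List Int) => row.set r v)
        (fun c : Nat => pvCell t ↑c ↑r) _ _ (N - 1) (by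
          calc (((((List.range N.toNat).reverse).map (fun c : Nat => pvCell t ↑c ↑r)).filter
              (fun v => decide (v ≠ 0))).length : Int)
              ≤ ((((List.range N.toNat).reverse).map (fun c : Nat => pvCell t ↑c ↑r)).length : Int) := by
                exact_mod_cast List.length_filter_le _ _
            _ ≤ N - 1 + 1 := by simp [hn])]
      rw [List.map_reverse, List.filter_reverse, show (N - 1).toNat = N.toNat - 1 by omega]
    rw [PySem.List.foldl_congr_mem _ _ _ _ (fun arr r _ => hstep arr r)]
    have hnz : ∀ r : Nat,
        (((List.range N.toNat).map (fun c : Nat => pvCell t ↑c ↑r)).filter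
          (fun v => decide (v ≠ 0))).length ≤ N.toNat := by
      intro r
      calc (((List.range N.toNat).map (fun c : Nat => pvCell t ↑c ↑r)).filter
          (fun v => decide (v ≠ 0))).length
          ≤ ((List.range N.toNat).map (fun c : Nat => pvCell t ↑c ↑r)).length :=
            List.length_filter_le _ _
        _ = N.toNat := by simp
    rw [pvDownAux _ _ hnz N.toNat (le_refl _)]
    apply List.map_congr_left
    intro i hi
    apply List.map_congr_left
    intro j hj
    rw [List.mem_range] at hi hj
    rw [if_pos hj]
    have hcols : PySem.List.pyGetD ((List.range N.toNat).map (fun r : Nat =>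
          pvSlide N "down" ((List.range N.toNat).map (fun c : Nat => pvCell t ↑c ↑r)))) ↑j []
        = pvSlide N "down" ((List.range N.toNat).map (fun c : Nat => pvCell t ↑c ↑j)) := by
      rw [PySem.List.pyGetD_natCast, List.getD_eq_getElem?_getD, List.getElem?_map,
        List.getElem?_range hj]
      rfl
    rw [hcols, PySem.List.pyGetD_natCast, pvSlide]
    simp only [if_pos (Or.inl rfl : ("down" : String) = "down" ∨ ("down" : String) = "right")]
    have hlen : ((N - (((List.range N.toNat).map (fun c : Nat => pvCell t ↑c ↑j)).filter
          (fun v => decide (v ≠ 0))).length).toNat)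
        = N.toNat - (((List.range N.toNat).map (fun c : Nat => pvCell t ↑c ↑j)).filter
          (fun v => decide (v ≠ 0))).length := by omega
    rw [hlen]
    simp

-- ===== VERDICT (by name: the statement is the Claim_ definition above) =====
theorem set_arr_spec : Claim_equal_set_arr := by
  intro t N dr _ _
  show set_arr t N dr = set_arr_alt t N dr
  by_cases h1 : dr = "up"
  · subst h1; exact pvUpCase t N
  by_cases h2 : dr = "down"
  · subst h2; exact pvDownCase t N
  by_cases h3 : dr = "left"
  · subst h3; exact pvLeftCase t N
  by_cases h4 : dr = "right"
  · subst h4; exact pvRightCase t N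
  rw [set_arr, set_arr_alt]
  rw [if_neg h1, if_neg h2, if_neg h3, if_neg h4, if_pos (by simp [h1, h2, h3, h4])]
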